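-- pv_equiv track=rewrite | github.com/wFeeL/store_ies_data | main_game4_final_adapted.py | contiguous_windows
-- ===== SOURCE A (Python) =====
-- from typing import Any, Dict, List, Optional, Tuple
--
-- def contiguous_windows(flags: List[bool], min_len: int = 1) -> List[Tuple[int, int]]:
--     out: List[Tuple[int, int]] = []
--     start: Optional[int] = None
--     for i, flag in enumerate(flags):
--         if flag and start is None:
--             start = i
--         elif not flag and start is not None:
--             if i - start >= min_len:
--                 out.append((start, i - 1))
--             start = None
--     if start is not None and len(flags) - start >= min_len:
--         out.append((start, len(flags) - 1))
--     return out
-- ===== SOURCE B (Python) =====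
-- from typing import List, Tuple
--
-- def contiguous_windows(flags: List[bool], min_len: int = 1) -> List[Tuple[int, int]]:
--     # Run-length encode the flags by truthiness, then scan the runs.
--     runs = []  # list of [key, length]
--     for f in flags:
--         k = bool(f)
--         if runs and runs[-1][0] == k:
--             runs[-1][1] += 1
--         else:
--             runs.append([k, 1])
--     out = []
--     idx = 0
--     for k, length in runs:
--         if k and length >= min_len:
--             out.append((idx, idx + length - 1))
--         idx += length
--     return out
-- ===== Notes on version B (the rewrite author's own statement) =====
-- stated objective: alternative
-- what changed: B first run-length encodes the flags into maximal runs of equal truthiness and then scans the runs with an index offset, instead of A's single pass tracking a start/None edge state with an end-of-loop flush.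
import Mathlib
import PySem

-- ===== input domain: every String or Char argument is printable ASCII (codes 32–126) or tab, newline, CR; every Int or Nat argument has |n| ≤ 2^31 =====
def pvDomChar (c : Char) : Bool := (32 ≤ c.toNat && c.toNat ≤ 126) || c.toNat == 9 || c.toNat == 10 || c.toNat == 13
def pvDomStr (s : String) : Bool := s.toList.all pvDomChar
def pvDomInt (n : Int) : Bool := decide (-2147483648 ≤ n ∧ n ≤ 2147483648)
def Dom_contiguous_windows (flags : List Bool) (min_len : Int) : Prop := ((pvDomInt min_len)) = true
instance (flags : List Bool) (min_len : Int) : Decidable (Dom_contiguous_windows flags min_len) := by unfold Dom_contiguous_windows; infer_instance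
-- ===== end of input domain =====

-- B re-implements A as run-length encoding followed by a scan over the runs; same O(n) cost, different decomposition.

-- ===== PORT A =====
-- A's for-loop over enumerate(flags), state (out, start), as structural recursion; i is the current index.
def cwLoopA (min_len : Int) : List Bool → List (Int × Int) → Option Int → Int → (List (Int × Int) × Option Int)
  | [], out, start, _ => (out, start)
  | flag :: rest, out, start, i =>
    match start with
    | none => if flag then cwLoopA min_len rest out (some i) (i + 1)
              else cwLoopA min_len rest out none (i + 1)
    | some s => if flag then cwLoopA min_len rest out (some s) (i + 1)
                else cwLoopA min_len rest (if i - s ≥ min_len then out ++ [(s, i - 1)] else out) none (i + 1)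

-- A's trailing flush after the loop (start is not None and len(flags) - start >= min_len).
def cwFinA (min_len : Int) (st : List (Int × Int) × Option Int) (endIdx : Int) : List (Int × Int) :=
  match st.2 with
  | some s => if endIdx - s ≥ min_len then st.1 ++ [(s, endIdx - 1)] else st.1
  | none => st.1

def contiguous_windows (flags : List Bool) (min_len : Int) : List (Int × Int) :=
  cwFinA min_len (cwLoopA min_len flags [] none 0) (flags.length : Int)

-- ===== PORT B =====
-- B's run-length-encoding pass (current run carried as (b, n), recursive form of the single pass).
def cwRunsGo : Bool → Nat → List Bool → List (Bool × Nat)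
  | b, n, [] => [(b, n)]
  | b, n, x :: xs => if x = b then cwRunsGo b (n + 1) xs else (b, n) :: cwRunsGo x 1 xs

def cwRuns : List Bool → List (Bool × Nat)
  | [] => []
  | x :: xs => cwRunsGo x 1 xs

-- B's scan over the runs with accumulator out and running index idx.
def cwLoopB (min_len : Int) : List (Bool × Nat) → List (Int × Int) → Int → List (Int × Int)
  | [], out, _ => out
  | (k, len) :: rest, out, idx =>
      cwLoopB min_len rest
        (if k && (len : Int) ≥ min_len then out ++ [(idx, idx + (len : Int) - 1)] else out)
        (idx + (len : Int))

def contiguous_windows_alt (flags : List Bool) (min_len : Int) : List (Int × Int) :=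
  cwLoopB min_len (cwRuns flags) [] 0

-- ===== PRECONDITION & SPEC =====
def Spec_contiguous_windows (flags : List Bool) (min_len : Int) (out : List (Int × Int)) : Prop := out = contiguous_windows_alt flags min_len
instance (flags : List Bool) (min_len : Int) (out : List (Int × Int)) : Decidable (Spec_contiguous_windows flags min_len out) := by unfold Spec_contiguous_windows; infer_instance

-- ===== CLAIM (what is proved, stated in full; the proofs are below) =====
def Claim_equal_contiguous_windows : Prop := ∀ (flags : List Bool) (min_len : Int), Dom_contiguous_windows flags min_len → Spec_contiguous_windows flags min_len (contiguous_windows flags min_len)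

-- ===== LEMMAS AND PROOFS =====

-- Invariant: with A mid-run of truthiness b of length n started at index i (start = some i iff b),
-- finishing A's loop and flushing equals B's scan of the remaining runs starting at offset i.
theorem cw_main (min_len : Int) :
    ∀ (rest : List Bool) (b : Bool) (n : Nat) (out : List (Int × Int)) (i : Int),
      cwFinA min_len
        (cwLoopA min_len rest out (if b then some i else none) (i + (n : Int)))
        (i + (n : Int) + (rest.length : Int))
      = cwLoopB min_len (cwRunsGo b n rest) out i := by
  intro rest
  induction rest with
  | nil =>
      intro b n out i
      cases b
      · simp [cwLoopA, cwRunsGo, cwLoopB, cwFinA]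
      · simp only [cwLoopA, cwRunsGo, cwLoopB, cwFinA, eq_self_iff_true, if_true,
          List.length_nil, Nat.cast_zero, add_zero, Bool.true_and, decide_eq_true_eq]
        rw [show i + (n : Int) - i = (n : Int) by ring]
  | cons x xs ih =>
      intro b n out i
      cases b <;> cases x
      · -- b = false, x = false: same run continues
        have h := ih false (n + 1) out i
        simp only [cwRunsGo, cwLoopA, cwLoopB, Bool.false_eq_true, eq_self_iff_true,
          if_true, if_false, List.length_cons, Nat.cast_one, Bool.true_and, Bool.false_and,
          decide_eq_true_eq] at h ⊢
        push_cast at h ⊢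
        ring_nf at h ⊢
        exact h
      · -- b = false, x = true: a true run starts at i + n
        have h := ih true 1 out (i + (n : Int))
        simp only [cwRunsGo, cwLoopA, cwLoopB, Bool.false_eq_true, Bool.true_eq_false,
          eq_self_iff_true, if_true, if_false, List.length_cons, Nat.cast_one,
          Bool.true_and, Bool.false_and, decide_eq_true_eq] at h ⊢
        push_cast at h ⊢
        ring_nf at h ⊢
        exact h
      · -- b = true, x = false: true run of length n ends; A flushes exactly what B emits
        have h := ih false 1 (if (n : Int) ≥ min_len then out ++ [(i, i + (n : Int) - 1)] else out) (i + (n : Int))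
        simp only [cwRunsGo, cwLoopA, cwLoopB, Bool.false_eq_true, Bool.true_eq_false,
          eq_self_iff_true, if_true, if_false, List.length_cons, Nat.cast_one,
          Bool.true_and, Bool.false_and, decide_eq_true_eq] at h ⊢
        push_cast at h ⊢
        ring_nf at h ⊢
        exact h
      · -- b = true, x = true: same run continues
        have h := ih true (n + 1) out i
        simp only [cwRunsGo, cwLoopA, cwLoopB, eq_self_iff_true, if_true,
          List.length_cons, Nat.cast_one, Bool.true_and, decide_eq_true_eq] at h ⊢
        push_cast at h ⊢
        ring_nf at h ⊢
        exact h

-- ===== VERDICT (by name: the statement is the Claim_ definition above) =====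
theorem contiguous_windows_spec : Claim_equal_contiguous_windows := by
  intro flags min_len _
  unfold Spec_contiguous_windows contiguous_windows contiguous_windows_alt
  cases flags with
  | nil => simp [cwLoopA, cwFinA, cwRuns, cwLoopB]
  | cons x xs =>
      have h := cw_main min_len xs x 1 [] 0
      cases x <;>
      · simp only [cwLoopA, cwRuns, reduceIte, List.length_cons, Nat.cast_one] at h ⊢
        push_cast at h ⊢
        ring_nf at h ⊢
        exact h
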